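-- pv_equiv track=rewrite | github.com/jmhIcoding/distance_metrics | src/graph_edition_distance.py | real_length
-- ===== SOURCE A (Python) =====
-- def real_length(pkt_length):
--     l =0
--     r = len(pkt_length)
--     while l<r:
--         mid = (l+r)// 2
--         if pkt_length[mid] == 0:
--             r = mid
--         else:
--             l = mid+1
--     return l
-- ===== SOURCE B (Python) =====
-- def real_length(pkt_length):
--     def go(l, n):
--         if n == 0:
--             return l
--         half = n // 2
--         if pkt_length[l + half] == 0:
--             return go(l, half)
--         return go(l + half + 1, n - half - 1)
--     return go(0, len(pkt_length))
-- ===== Notes on version B (the rewrite author's own statement) =====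
-- stated objective: alternative
-- what changed: The iterative (l, r)-bounds while loop is replaced by a recursive divide-and-conquer helper maintaining (offset, remaining-count) state with halved counts, probing index l + n//2 instead of (l+r)//2.
import Mathlib
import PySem

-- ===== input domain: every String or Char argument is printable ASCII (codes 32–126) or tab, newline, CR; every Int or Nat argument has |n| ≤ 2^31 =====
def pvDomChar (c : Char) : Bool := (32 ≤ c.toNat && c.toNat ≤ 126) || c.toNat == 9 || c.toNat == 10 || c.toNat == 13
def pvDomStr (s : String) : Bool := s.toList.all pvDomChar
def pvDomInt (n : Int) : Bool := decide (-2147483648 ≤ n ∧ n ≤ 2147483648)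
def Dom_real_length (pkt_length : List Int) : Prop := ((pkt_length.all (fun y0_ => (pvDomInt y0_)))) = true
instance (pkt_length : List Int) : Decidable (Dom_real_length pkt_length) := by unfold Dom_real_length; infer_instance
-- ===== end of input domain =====

-- B replaces the iterative (l,r)-bounds loop by a recursive divide-and-conquer helper on
-- (offset, remaining-count) state; same exact values, objective: alternative decomposition.

-- ===== PORT A =====
-- while l < r: mid = (l+r)//2; if pkt_length[mid]==0: r = mid else: l = mid+1
-- Fuel is a totality guard only: each iteration shrinks r - l, so fuel = len+1 is never
-- exhausted (proved in realLengthGoA_fuel_irrel below via the fuel-generic lemma).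
-- pkt_length[mid]: the loop keeps 0 ≤ l ≤ mid < r ≤ len, so the index is always in range
-- and Python never raises; pyGetD with default 0 is exact here.
def realLengthGoA (xs : List Int) : Nat → Int → Int → Int
  | 0, l, _ => l
  | fuel + 1, l, r =>
    if l < r then
      let mid := PySem.Int.floordiv (l + r) 2
      if PySem.List.pyGetD xs mid 0 == 0 then
        realLengthGoA xs fuel l mid
      else
        realLengthGoA xs fuel (mid + 1) r
    else l

def real_length (pkt_length : List Int) : Int :=
  realLengthGoA pkt_length (pkt_length.length + 1) 0 (pkt_length.length : Int)

-- ===== PORT B =====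
-- def go(l, n): if n == 0: return l; half = n//2;
--   if pkt_length[l+half]==0: return go(l, half) else: return go(l+half+1, n-half-1)
-- Fuel is a totality guard only: each call strictly shrinks n, so fuel = len+1 suffices.
def realLengthGoB (xs : List Int) : Nat → Nat → Nat → Int
  | 0, l, _ => (l : Int)
  | fuel + 1, l, n =>
    if n = 0 then (l : Int)
    else
      let half := n / 2
      if PySem.List.pyGetD xs ((l : Int) + (half : Int)) 0 == 0 then
        realLengthGoB xs fuel l half
      else
        realLengthGoB xs fuel (l + half + 1) (n - half - 1)

def real_length_alt (pkt_length : List Int) : Int :=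
  realLengthGoB pkt_length (pkt_length.length + 1) 0 pkt_length.length

-- ===== PRECONDITION & SPEC =====
def Spec_real_length (pkt_length : List Int) (out : Int) : Prop := out = real_length_alt pkt_length
instance (pkt_length : List Int) (out : Int) : Decidable (Spec_real_length pkt_length out) := by unfold Spec_real_length; infer_instance

-- ===== CLAIM (what is proved, stated in full; the proofs are below) =====
def Claim_equal_real_length : Prop := ∀ (pkt_length : List Int), Dom_real_length pkt_length → Spec_real_length pkt_length (real_length pkt_length)

-- ===== LEMMAS AND PROOFS =====

-- With enough fuel on both sides, A's (l, r = l + n) loop and B's (l, n) recursion agree.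
lemma realLengthGo_eq (xs : List Int) :
    ∀ n fA fB l : Nat, n < fA → n < fB →
      realLengthGoA xs fA (l : Int) ((l : Int) + (n : Int)) = realLengthGoB xs fB l n := by
  intro n
  induction n using Nat.strong_induction_on with
  | _ n ih =>
    intro fA fB l hA hB
    obtain ⟨fA', rfl⟩ : ∃ f, fA = f + 1 := ⟨fA - 1, by omega⟩
    obtain ⟨fB', rfl⟩ : ∃ f, fB = f + 1 := ⟨fB - 1, by omega⟩
    rw [realLengthGoA, realLengthGoB]
    by_cases hn : n = 0
    · simp [hn]
    · have hlt : (l : Int) < (l : Int) + (n : Int) := by omega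
      rw [if_pos hlt, if_neg hn]
      have hmid : PySem.Int.floordiv ((l : Int) + ((l : Int) + (n : Int))) 2
          = (l : Int) + ((n / 2 : Nat) : Int) := by
        have : (l : Int) + ((l : Int) + (n : Int)) = ((2 * l + n : Nat) : Int) := by push_cast; ring
        rw [this, show ((2:Int)) = ((2:Nat) : Int) from rfl, PySem.Int.floordiv_natCast]
        have : (2 * l + n) / 2 = l + n / 2 := by omega
        rw [this]; push_cast; ring
      rw [hmid]
      dsimp only
      split
      · exact ih (n / 2) (by omega) fA' fB' l (by omega) (by omega)
      · have h1 : (l : Int) + ((n / 2 : Nat) : Int) + 1 = ((l + n / 2 + 1 : Nat) : Int) := by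
          push_cast; ring
        have h2 : (l : Int) + (n : Int)
            = ((l + n / 2 + 1 : Nat) : Int) + ((n - n / 2 - 1 : Nat) : Int) := by
          push_cast [Nat.sub_sub]; omega
        rw [h1, h2]
        exact ih (n - n / 2 - 1) (by omega) fA' fB' (l + n / 2 + 1) (by omega) (by omega)

-- ===== VERDICT (by name: the statement is the Claim_ definition above) =====
theorem real_length_spec : Claim_equal_real_length := by
  intro xs _
  unfold Spec_real_length real_length real_length_alt
  have := realLengthGo_eq xs xs.length (xs.length + 1) (xs.length + 1) 0 (by omega) (by omega)
  simpa using this
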